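-- pv_equiv track=rewrite | github.com/efarmerce/Conversational-AI-for-Farmers | Voice kit/helper.py | getMonth
-- ===== SOURCE A (Python) =====
-- def getMonth(text):
--     months=[[0,"january","jan","1st","genral"],
--             [1,"february","feb","2nd","fidelity","debility","severity"],
--             [2,"march","mar","3rd","watch","mark"],
--             [3,"april","apr","4th","appel","apple"],
--             [4,"may","may","5th"],
--             [5,"june","jun","6th","room","tour"],
--             [6,"july","jul","7th","julie"],
--             [7,"august","aug","8th"],
--             [8,"september","sep","9th"],
--             [9,"october","oct","10th"],
--             [10,"november","nov","11th"],
--             [11,"december","dec","12th"]]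
--     check=0
--     for month in months:
--         check+=1
--         for alternatives in month:
--             if type(alternatives) is not int:
--                 if alternatives.lower() in text.lower():
--                     return check
--     return None
-- ===== SOURCE B (Python) =====
-- # Text-driven scan: walk the lowered text once; at each position, consult a
-- # first-character index of keywords, prefix-match candidates there, and keep
-- # the match of smallest table priority.  Returns that entry's month number.
-- _TABLE = [
--     (1, "january"), (1, "jan"), (1, "1st"), (1, "genral"),
--     (2, "february"), (2, "feb"), (2, "2nd"), (2, "fidelity"), (2, "debility"), (2, "severity"),
--     (3, "march"), (3, "mar"), (3, "3rd"), (3, "watch"), (3, "mark"),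
--     (4, "april"), (4, "apr"), (4, "4th"), (4, "appel"), (4, "apple"),
--     (5, "may"), (5, "may"), (5, "5th"),
--     (6, "june"), (6, "jun"), (6, "6th"), (6, "room"), (6, "tour"),
--     (7, "july"), (7, "jul"), (7, "7th"), (7, "julie"),
--     (8, "august"), (8, "aug"), (8, "8th"),
--     (9, "september"), (9, "sep"), (9, "9th"),
--     (10, "october"), (10, "oct"), (10, "10th"),
--     (11, "november"), (11, "nov"), (11, "11th"),
--     (12, "december"), (12, "dec"), (12, "12th"),
-- ]
--
-- # first char -> candidates [(priority, month, keyword)], in table (priority) order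
-- _INDEX = {
--     c: [(p, m, kw) for p, (m, kw) in enumerate(_TABLE) if kw[0] == c]
--     for c in {kw[0] for _, kw in _TABLE}
-- }
--
-- def getMonth(text):
--     lowered = text.lower()
--     best = None  # (priority, month) of the best match seen so far
--     for i in range(len(lowered)):
--         for prio, month, kw in _INDEX.get(lowered[i], ()):
--             if (best is None or prio < best[0]) and lowered.startswith(kw, i):
--                 best = (prio, month)
--     return best[1] if best is not None else None
-- ===== Notes on version B (the rewrite author's own statement) =====
-- stated objective: alternative
-- what changed: Replaces A's keyword-driven nested loop (each keyword substring-searched through the text) by a single text-driven scan: walk the lowered text once, prefix-match candidate keywords found via a first-character index, and keep the match of smallest table priority.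
import Mathlib
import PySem

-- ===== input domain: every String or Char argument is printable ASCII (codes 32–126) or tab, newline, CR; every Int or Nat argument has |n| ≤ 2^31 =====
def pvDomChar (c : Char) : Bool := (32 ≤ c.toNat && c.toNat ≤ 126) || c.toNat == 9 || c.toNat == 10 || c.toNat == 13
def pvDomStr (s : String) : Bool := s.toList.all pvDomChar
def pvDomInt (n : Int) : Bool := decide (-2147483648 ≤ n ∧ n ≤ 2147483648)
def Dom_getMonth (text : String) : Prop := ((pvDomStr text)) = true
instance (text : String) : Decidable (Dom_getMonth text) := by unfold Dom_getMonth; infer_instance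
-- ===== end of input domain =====

-- B replaces A's keyword-driven nested loop by a single text-driven scan with a
-- first-character keyword index and a best-priority accumulator (objective: alternative).

-- ===== PORT A =====
-- A's months table: each month is a heterogeneous list (one int sentinel, then keyword strings)
def monthsA : List (List (Sum Int String)) :=
  [[.inl 0, .inr "january", .inr "jan", .inr "1st", .inr "genral"],
   [.inl 1, .inr "february", .inr "feb", .inr "2nd", .inr "fidelity", .inr "debility", .inr "severity"],
   [.inl 2, .inr "march", .inr "mar", .inr "3rd", .inr "watch", .inr "mark"],
   [.inl 3, .inr "april", .inr "apr", .inr "4th", .inr "appel", .inr "apple"],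
   [.inl 4, .inr "may", .inr "may", .inr "5th"],
   [.inl 5, .inr "june", .inr "jun", .inr "6th", .inr "room", .inr "tour"],
   [.inl 6, .inr "july", .inr "jul", .inr "7th", .inr "julie"],
   [.inl 7, .inr "august", .inr "aug", .inr "8th"],
   [.inl 8, .inr "september", .inr "sep", .inr "9th"],
   [.inl 9, .inr "october", .inr "oct", .inr "10th"],
   [.inl 10, .inr "november", .inr "nov", .inr "11th"],
   [.inl 11, .inr "december", .inr "dec", .inr "12th"]]

-- inner loop of A: skip ints, return check on first keyword found in text.lower()
def innerA (text : String) (check : Int) : List (Sum Int String) -> Option Int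
  | [] => none
  | .inl _ :: rest => innerA text check rest
  | .inr s :: rest =>
      if PySem.Str.isIn (PySem.Str.lower s) (PySem.Str.lower text) then some check
      else innerA text check rest

-- outer loop of A, with the running counter `check`
def outerA (text : String) (check : Int) : List (List (Sum Int String)) -> Option Int
  | [] => none
  | m :: rest =>
      match innerA text (check + 1) m with
      | some r => some r
      | none => outerA text (check + 1) rest

def getMonth (text : String) : Option Int := outerA text 0 monthsA

-- ===== PORT B =====
-- Source B's _TABLE: flat priority-ordered list of (month_number, keyword)
def tableB : List (Int × String) :=
  [(1, "january"), (1, "jan"), (1, "1st"), (1, "genral"),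
   (2, "february"), (2, "feb"), (2, "2nd"), (2, "fidelity"), (2, "debility"), (2, "severity"),
   (3, "march"), (3, "mar"), (3, "3rd"), (3, "watch"), (3, "mark"),
   (4, "april"), (4, "apr"), (4, "4th"), (4, "appel"), (4, "apple"),
   (5, "may"), (5, "may"), (5, "5th"),
   (6, "june"), (6, "jun"), (6, "6th"), (6, "room"), (6, "tour"),
   (7, "july"), (7, "jul"), (7, "7th"), (7, "julie"),
   (8, "august"), (8, "aug"), (8, "8th"),
   (9, "september"), (9, "sep"), (9, "9th"),
   (10, "october"), (10, "oct"), (10, "10th"),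
   (11, "november"), (11, "nov"), (11, "11th"),
   (12, "december"), (12, "dec"), (12, "12th")]

-- enumerate(_TABLE): (priority, month, keyword chars)
def withPrio : List (Int × Int × List Char) :=
  (PySem.List.enumerate tableB).map (fun e => (e.1, e.2.1, e.2.2.toList))

-- Source B's _INDEX bucket for first character c (the comprehension `[e for e in enumerate(_TABLE) if kw[0]==c]`);
-- `kw[0] == c` is written `head? == some c` (every keyword is nonempty)
def bucket (c : Char) : List (Int × Int × List Char) :=
  withPrio.filter (fun e => e.2.2.head? == some c)

-- the inner-loop body: update `best` when e beats it and its keyword starts at this suffix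
def updB (s : List Char) (b : Option (Int × Int)) (e : Int × Int × List Char) : Option (Int × Int) :=
  if ((match b with | none => true | some v => decide (e.1 < v.1)) && e.2.2.isPrefixOf s)
  then some (e.1, e.2.1) else b

-- the `for i in range(len(lowered))` loop, as recursion over suffixes:
-- lowered[i] is the suffix head, `lowered.startswith(kw, i)` is `kw.isPrefixOf suffix`
def scanB (best : Option (Int × Int)) : List Char → Option (Int × Int)
  | [] => best
  | c :: rest => scanB ((bucket c).foldl (updB (c :: rest)) best) rest

def getMonth_alt (text : String) : Option Int :=
  match scanB none (PySem.Str.lower text).toList with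
  | some v => some v.2
  | none => none

-- ===== PRECONDITION & SPEC =====
def Spec_getMonth (text : String) (out : Option Int) : Prop := out = getMonth_alt text
instance (text : String) (out : Option Int) : Decidable (Spec_getMonth text out) := by unfold Spec_getMonth; infer_instance

-- ===== CLAIM (what is proved, stated in full; the proofs are below) =====
def Claim_equal_getMonth : Prop := ∀ (text : String), Dom_getMonth text → Spec_getMonth text (getMonth text)

-- ===== LEMMAS AND PROOFS =====

-- ---- A side: getMonth is "first table entry whose keyword is a substring" ----

def findB (lowered : String) : List (Int × String) -> Option Int
  | [] => none
  | (num, kw) :: rest =>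
      if PySem.Str.isIn kw lowered then some num else findB lowered rest

-- flatten A's month table, threading A's counter and lowering the keywords
def flatOf (check : Int) : List (List (Sum Int String)) -> List (Int × String)
  | [] => []
  | m :: rest =>
      m.filterMap (fun e => match e with
        | .inl _ => none
        | .inr s => some (check + 1, PySem.Str.lower s)) ++ flatOf (check + 1) rest

theorem findB_append (l : String) (xs ys : List (Int × String)) :
    findB l (xs ++ ys) = match findB l xs with | some r => some r | none => findB l ys := by
  induction xs with
  | nil => simp [findB]
  | cons p rest ih =>
      obtain ⟨n, kw⟩ := p
      simp only [List.cons_append, findB]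
      split <;> simp [ih]

theorem innerA_eq (text : String) (check : Int) (m : List (Sum Int String)) :
    innerA text check m
      = findB (PySem.Str.lower text) (m.filterMap (fun e => match e with
          | .inl _ => none
          | .inr s => some (check, PySem.Str.lower s))) := by
  induction m with
  | nil => simp [innerA, findB]
  | cons e rest ih =>
      cases e with
      | inl k => simpa [innerA, List.filterMap] using ih
      | inr s =>
          simp only [innerA, List.filterMap_cons, findB]
          split <;> simp [ih]

theorem outerA_eq (text : String) (ms : List (List (Sum Int String))) (check : Int) :
    outerA text check ms = findB (PySem.Str.lower text) (flatOf check ms) := by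
  induction ms generalizing check with
  | nil => simp [outerA, flatOf, findB]
  | cons m rest ih =>
      simp only [outerA, flatOf, findB_append, innerA_eq, ih]

theorem flat_monthsA : flatOf 0 monthsA = tableB := by decide

theorem findB_eq_head_filter (L : String) (tbl : List (Int × String)) :
    findB L tbl = ((tbl.filter (fun e => PySem.Str.isIn e.2 L)).head?).map (·.1) := by
  induction tbl with
  | nil => simp [findB]
  | cons p rest ih =>
      obtain ⟨n, kw⟩ := p
      simp only [findB, List.filter_cons]
      split <;> simp_all

-- ---- B side machinery ----

-- pure best-of-two: keep b unless e has strictly smaller priority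
def m2 (b : Option (Int × Int)) (e : Int × Int × List Char) : Option (Int × Int) :=
  match b with
  | none => some (e.1, e.2.1)
  | some v => if e.1 < v.1 then some (e.1, e.2.1) else some v

def m2opt (b : Option (Int × Int)) (a : Option (Int × Int × List Char)) : Option (Int × Int) :=
  match a with
  | none => b
  | some e => m2 b e

-- leftmost-minimum of two optional entries (priority order)
def hmin (a b : Option (Int × Int × List Char)) : Option (Int × Int × List Char) :=
  match a, b with
  | none, b => b
  | some x, none => some x
  | some x, some y => if y.1 < x.1 then some y else some x

theorem updB_eq (s : List Char) (b : Option (Int × Int)) (e : Int × Int × List Char) :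
    updB s b e = if e.2.2.isPrefixOf s then m2 b e else b := by
  cases b <;> simp [updB, m2] <;> split_ifs <;> simp_all

theorem foldl_m2_stall (t : List (Int × Int × List Char)) (v : Int × Int)
    (h : ∀ x ∈ t, ¬ x.1 < v.1) : t.foldl m2 (some v) = some v := by
  induction t with
  | nil => rfl
  | cons e t ih =>
      have he : ¬ e.1 < v.1 := h e (by simp)
      simp only [List.foldl_cons, m2, if_neg he]
      exact ih (fun x hx => h x (by simp [hx]))

theorem foldl_m2_sorted (l : List (Int × Int × List Char)) (b : Option (Int × Int))
    (h : l.Pairwise (fun x y => x.1 < y.1)) :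
    l.foldl m2 b = m2opt b l.head? := by
  cases l with
  | nil => rfl
  | cons e t =>
      simp only [List.foldl_cons, List.head?_cons, m2opt]
      have ht : ∀ x ∈ t, e.1 < x.1 := (List.pairwise_cons.mp h).1
      have hp : ∃ v, m2 b e = some v ∧ v.1 ≤ e.1 := by
        cases b with
        | none => exact ⟨(e.1, e.2.1), rfl, le_refl _⟩
        | some v =>
            by_cases hlt : e.1 < v.1
            · exact ⟨(e.1, e.2.1), by simp [m2, hlt], le_refl _⟩
            · exact ⟨v, by simp [m2, hlt], by omega⟩
      obtain ⟨v, hv, hle⟩ := hp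
      rw [hv]
      exact foldl_m2_stall t v (fun x hx => by have := ht x hx; omega)

theorem m2opt_hmin (b : Option (Int × Int)) (a1 a2 : Option (Int × Int × List Char)) :
    m2opt (m2opt b a1) a2 = m2opt b (hmin a1 a2) := by
  cases a1 with
  | none => cases a2 <;> rfl
  | some x =>
      cases a2 with
      | none => rfl
      | some y =>
          cases b with
          | none =>
              simp only [m2opt, m2, hmin]
              by_cases hyx : y.1 < x.1 <;> simp [hyx]
          | some w =>
              simp only [m2opt, m2, hmin]
              by_cases hyx : y.1 < x.1 <;> by_cases hxw : x.1 < w.1 <;>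
                by_cases hyw : y.1 < w.1 <;> simp [hyx, hxw, hyw] <;> omega

theorem head_filter_or (l : List (Int × Int × List Char))
    (h : l.Pairwise (fun x y => x.1 < y.1)) (p q : Int × Int × List Char → Bool) :
    (l.filter (fun e => p e || q e)).head? = hmin ((l.filter p).head?) ((l.filter q).head?) := by
  induction l with
  | nil => rfl
  | cons e t ih =>
      have ht : ∀ x ∈ t, e.1 < x.1 := (List.pairwise_cons.mp h).1
      have ih' := ih (List.pairwise_cons.mp h).2
      by_cases hp : p e <;> by_cases hq : q e <;>
        simp only [List.filter_cons, hp, hq, Bool.true_or, Bool.false_or, Bool.or_self,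
          if_true, if_false, List.head?_cons, cond_true, cond_false]
      · -- p e, q e
        simp [hmin]
      · -- p e, ¬ q e
        cases hy : (t.filter q).head? with
        | none => simp [hmin, hy]
        | some y =>
            have hyt : y ∈ t := List.mem_of_mem_filter (List.mem_of_mem_head? hy)
            have : ¬ y.1 < e.1 := by have := ht y hyt; omega
            simp [hmin, hy, this]
      · -- ¬ p e, q e
        cases hx : (t.filter p).head? with
        | none => simp [hmin, hx]
        | some x =>
            have hxt : x ∈ t := List.mem_of_mem_filter (List.mem_of_mem_head? hx)
            have : e.1 < x.1 := ht x hxt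
            simp [hmin, hx, this]
      · exact ih'

-- facts about the literal table
theorem withPrio_pairwise : withPrio.Pairwise (fun x y => x.1 < y.1) := by decide

theorem withPrio_kw_ne_nil : ∀ e ∈ withPrio, e.2.2 ≠ [] := by decide

theorem isPrefixOf_cons_head {kw : List Char} {c : Char} {rest : List Char}
    (hne : kw ≠ []) (h : kw.isPrefixOf (c :: rest) = true) : kw.head? = some c := by
  cases kw with
  | nil => exact absurd rfl hne
  | cons k t =>
      simp only [List.isPrefixOf, Bool.and_eq_true, beq_iff_eq] at h
      simp [h.1]

-- the bucket lookup plus prefix test sees exactly the table's prefix matches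
theorem bucket_filter (c : Char) (rest : List Char) :
    (bucket c).filter (fun e => e.2.2.isPrefixOf (c :: rest))
      = withPrio.filter (fun e => e.2.2.isPrefixOf (c :: rest)) := by
  unfold bucket
  rw [List.filter_filter]
  apply List.filter_congr
  intro e he
  by_cases h : e.2.2.isPrefixOf (c :: rest)
  · have := isPrefixOf_cons_head (withPrio_kw_ne_nil e he) h
    simp [h, this]
  · simp [h]

theorem isPrefixOf_false_of_not {kw l : List Char} (h : ¬ kw <+: l) :
    kw.isPrefixOf l = false := by
  rw [Bool.eq_false_iff]
  intro h'
  exact h (List.isPrefixOf_iff_prefix.mp h')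

theorem isInfixOf_cons (kw : List Char) (c : Char) (rest : List Char) :
    PySem.Chars.isIn kw (c :: rest) = (kw.isPrefixOf (c :: rest) || PySem.Chars.isIn kw rest) := by
  rcases h : PySem.Chars.isIn kw (c :: rest) with _ | _
  · rw [PySem.Chars.isIn_eq_false_iff] at h
    rw [List.infix_cons_iff] at h
    push_neg at h
    rw [isPrefixOf_false_of_not h.1, (PySem.Chars.isIn_eq_false_iff _ _).mpr h.2]
    rfl
  · rw [PySem.Chars.isIn_iff_infix, List.infix_cons_iff] at h
    rcases h with h | h
    · simp [List.isPrefixOf_iff_prefix.mpr h]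
    · simp [(PySem.Chars.isIn_iff_infix _ _).mpr h]

-- the scan computes the minimal-priority entry whose keyword occurs in the text
theorem scanB_eq (L : List Char) : ∀ (best : Option (Int × Int)),
    scanB best L = m2opt best ((withPrio.filter (fun e => PySem.Chars.isIn e.2.2 L)).head?) := by
  induction L with
  | nil =>
      intro best
      have : withPrio.filter (fun e => PySem.Chars.isIn e.2.2 ([] : List Char)) = [] := by decide
      simp [scanB, this, m2opt]
  | cons c rest ih =>
      intro best
      have step : (bucket c).foldl (updB (c :: rest)) best
          = m2opt best (((bucket c).filter (fun e => e.2.2.isPrefixOf (c :: rest))).head?) := by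
        have hfun : updB (c :: rest)
            = (fun b e => if e.2.2.isPrefixOf (c :: rest) then m2 b e else b) :=
          funext fun b => funext fun e => updB_eq (c :: rest) b e
        rw [hfun, ← List.foldl_filter, bucket_filter]
        exact foldl_m2_sorted _ best (withPrio_pairwise.filter _)
      rw [scanB, step, ih, bucket_filter, m2opt_hmin]
      congr 1
      have : withPrio.filter (fun e => PySem.Chars.isIn e.2.2 (c :: rest))
          = withPrio.filter (fun e => e.2.2.isPrefixOf (c :: rest) || PySem.Chars.isIn e.2.2 rest) := by
        apply List.filter_congr
        intro e _
        exact isInfixOf_cons e.2.2 c rest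
      rw [this]
      exact (head_filter_or withPrio withPrio_pairwise _ _).symm

-- ---- bridging the two tables ----

theorem withPrio_map : withPrio.map (fun e => (e.2.1, String.ofList e.2.2)) = tableB := by decide

theorem tables_agree (L : String) :
    ((tableB.filter (fun e => PySem.Str.isIn e.2 L)).head?).map (·.1)
      = ((withPrio.filter (fun e => PySem.Chars.isIn e.2.2 L.toList)).head?).map (·.2.1) := by
  have hf : withPrio.filter ((fun e => PySem.Str.isIn e.2 L) ∘ (fun e => (e.2.1, String.ofList e.2.2)))
      = withPrio.filter (fun e => PySem.Chars.isIn e.2.2 L.toList) := by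
    apply List.filter_congr
    intro e _
    simp [Function.comp]
  conv_lhs => rw [← withPrio_map]
  rw [List.filter_map, hf, List.head?_map, Option.map_map]
  rfl

-- ===== VERDICT (by name: the statement is the Claim_ definition above) =====
theorem getMonth_spec : Claim_equal_getMonth := by
  intro text _
  unfold Spec_getMonth getMonth getMonth_alt
  rw [outerA_eq, flat_monthsA, findB_eq_head_filter, scanB_eq, tables_agree]
  cases (withPrio.filter (fun e => PySem.Chars.isIn e.2.2 (PySem.Str.lower text).toList)).head? with
  | none => rfl
  | some e => rfl
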